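-- pv_equiv track=rewrite | github.com/khl02007/v1ca1 | src/v1ca1/ripple/ripple_decoding_comparison.py | get_epoch_list
-- ===== SOURCE A (Python) =====
-- def get_epoch_list(
--     num_sleep_epochs: int, num_run_epochs: int
-- ) -> tuple[list[str], list[str]]:
--     """Return alternating sleep/run epoch names matching the local session convention."""
--     if abs(num_sleep_epochs - num_run_epochs) != 1:
--         raise ValueError("The run and sleep epochs must alternate.")
--
--     sleep_epoch_tags = [f"s{i + 1}" for i in range(num_sleep_epochs)]
--     run_epoch_tags = [f"r{i + 1}" for i in range(num_run_epochs)]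
--     epoch_list: list[str] = []
--     if num_sleep_epochs > num_run_epochs:
--         for i in range(num_sleep_epochs + num_run_epochs):
--             if i % 2 == 0:
--                 epoch_tag = sleep_epoch_tags[i // 2]
--             else:
--                 epoch_tag = run_epoch_tags[i // 2]
--             epoch_list.append(f"{i + 1:02d}_{epoch_tag}")
--         run_epoch_list = epoch_list[1::2]
--     else:
--         for i in range(num_sleep_epochs + num_run_epochs):
--             if i % 2 == 0:
--                 epoch_tag = run_epoch_tags[i // 2]
--             else:
--                 epoch_tag = sleep_epoch_tags[i // 2]
--             epoch_list.append(f"{i + 1:02d}_{epoch_tag}")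
--         run_epoch_list = epoch_list[::2]
--     return epoch_list, run_epoch_list
-- ===== SOURCE B (Python) =====
-- def _interleave(lead, trail):
--     """Pairwise interleave; lead is expected to be one longer than trail (or both empty)."""
--     out = []
--     for a, b in zip(lead, trail):
--         out += [a, b]
--     return out + lead[len(trail):]
--
--
-- def get_epoch_list(
--     num_sleep_epochs: int, num_run_epochs: int
-- ) -> tuple[list[str], list[str]]:
--     """Return alternating sleep/run epoch names matching the local session convention."""
--     if abs(num_sleep_epochs - num_run_epochs) != 1:
--         raise ValueError("The run and sleep epochs must alternate.")
--
--     sleep_tags = ["s%d" % (i + 1) for i in range(num_sleep_epochs)]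
--     run_tags = ["r%d" % (i + 1) for i in range(num_run_epochs)]
--     if num_sleep_epochs > num_run_epochs:
--         lead, trail = sleep_tags, run_tags
--     else:
--         lead, trail = run_tags, sleep_tags
--     tags = _interleave(lead, trail)
--     epoch_list = ["%02d_%s" % (i + 1, t) for i, t in enumerate(tags)]
--     run_epoch_list = [e for e, t in zip(epoch_list, tags) if t.startswith("r")]
--     return epoch_list, run_epoch_list
-- ===== Notes on version B (the rewrite author's own statement) =====
-- stated objective: alternative
-- what changed: Instead of one parity-indexed loop doing i//2 lookups and then parity slicing, B zip-interleaves the two tag lists pairwise, numbers them with enumerate, and selects the run entries by their 'r' tag prefix.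
import Mathlib
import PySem

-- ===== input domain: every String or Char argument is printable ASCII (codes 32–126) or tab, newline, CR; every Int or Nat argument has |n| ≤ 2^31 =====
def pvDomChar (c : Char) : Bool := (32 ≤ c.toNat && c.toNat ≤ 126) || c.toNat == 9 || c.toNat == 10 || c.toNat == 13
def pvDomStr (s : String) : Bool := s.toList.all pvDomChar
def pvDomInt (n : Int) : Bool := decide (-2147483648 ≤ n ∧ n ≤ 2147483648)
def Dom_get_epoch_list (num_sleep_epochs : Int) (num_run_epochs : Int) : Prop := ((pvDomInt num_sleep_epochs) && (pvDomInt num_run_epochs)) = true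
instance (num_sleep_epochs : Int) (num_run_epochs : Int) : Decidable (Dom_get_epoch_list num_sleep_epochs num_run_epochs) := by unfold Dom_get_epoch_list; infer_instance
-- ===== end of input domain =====

-- B replaces A's parity-indexed loop (i//2 lookups, then parity slicing) by a pairwise
-- zip-interleave of the two tag lists, enumerate for the numbering, and a tag-prefix filter
-- for the run entries (objective: alternative; same O(n) cost).

-- shared formatting helper: f"{m:02d}_{tag}" / "%02d_%s" % (m, tag); both Pythons format m = i+1 ≥ 1
def pvName (m : Int) (tag : List Char) : String :=
  String.ofList ((if m < 10 then '0' :: PySem.Int.toChars m else PySem.Int.toChars m) ++ '_' :: tag)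

-- ===== PORT A =====
def get_epoch_list (num_sleep_epochs : Int) (num_run_epochs : Int) : List String × List String :=
  let sleepTags := (PySem.List.pyRange 0 num_sleep_epochs 1).map (fun i => 's' :: PySem.Int.toChars (i + 1))
  let runTags := (PySem.List.pyRange 0 num_run_epochs 1).map (fun i => 'r' :: PySem.Int.toChars (i + 1))
  if num_sleep_epochs > num_run_epochs then
    let epochList := (PySem.List.pyRange 0 (num_sleep_epochs + num_run_epochs) 1).foldl (fun acc i =>
      let tag := if PySem.Int.mod i 2 = 0 then PySem.List.pyGetD sleepTags (PySem.Int.floordiv i 2) []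
                 else PySem.List.pyGetD runTags (PySem.Int.floordiv i 2) []
      acc ++ [pvName (i + 1) tag]) []
    (epochList, (PySem.List.slice? epochList (some 1) none 2).getD [])
  else
    let epochList := (PySem.List.pyRange 0 (num_sleep_epochs + num_run_epochs) 1).foldl (fun acc i =>
      let tag := if PySem.Int.mod i 2 = 0 then PySem.List.pyGetD runTags (PySem.Int.floordiv i 2) []
                 else PySem.List.pyGetD sleepTags (PySem.Int.floordiv i 2) []
      acc ++ [pvName (i + 1) tag]) []
    (epochList, (PySem.List.slice? epochList none none 2).getD [])

-- ===== PORT B =====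
-- _interleave(lead, trail): zip loop appending the pairs, then the unmatched tail lead[len(trail):]
def pvInterleave {α : Type} (lead trail : List α) : List α :=
  (lead.zip trail).foldl (fun acc p => acc ++ [p.1, p.2]) []
    ++ PySem.List.slice lead (some (trail.length : Int)) none

def get_epoch_list_alt (num_sleep_epochs : Int) (num_run_epochs : Int) : List String × List String :=
  let sleepTags := (PySem.List.pyRange 0 num_sleep_epochs 1).map (fun i => 's' :: PySem.Int.toChars (i + 1))
  let runTags := (PySem.List.pyRange 0 num_run_epochs 1).map (fun i => 'r' :: PySem.Int.toChars (i + 1))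
  let lt := if num_sleep_epochs > num_run_epochs then (sleepTags, runTags) else (runTags, sleepTags)
  let tags := pvInterleave lt.1 lt.2
  let epochList := (PySem.List.enumerate tags 0).map (fun p => pvName (p.1 + 1) p.2)
  let runList := ((epochList.zip tags).filter (fun p => PySem.Chars.startswith p.2 ['r'])).map (fun p => p.1)
  (epochList, runList)

-- ===== PRECONDITION & SPEC =====
-- Pre_: A raises ValueError unless abs(num_sleep_epochs - num_run_epochs) == 1
def Pre_get_epoch_list (num_sleep_epochs : Int) (num_run_epochs : Int) : Prop :=
  num_sleep_epochs - num_run_epochs = 1 ∨ num_run_epochs - num_sleep_epochs = 1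
instance (num_sleep_epochs : Int) (num_run_epochs : Int) : Decidable (Pre_get_epoch_list num_sleep_epochs num_run_epochs) := by unfold Pre_get_epoch_list; infer_instance
def pvWitness_get_epoch_list : Int × Int := (3, 2)

def Spec_get_epoch_list (num_sleep_epochs : Int) (num_run_epochs : Int) (out : List String × List String) : Prop := out = get_epoch_list_alt num_sleep_epochs num_run_epochs
instance (num_sleep_epochs : Int) (num_run_epochs : Int) (out : List String × List String) : Decidable (Spec_get_epoch_list num_sleep_epochs num_run_epochs out) := by unfold Spec_get_epoch_list; infer_instance

-- ===== CLAIM (what is proved, stated in full; the proofs are below) =====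
def Claim_equal_get_epoch_list : Prop := ∀ (num_sleep_epochs : Int) (num_run_epochs : Int), Dom_get_epoch_list num_sleep_epochs num_run_epochs → Pre_get_epoch_list num_sleep_epochs num_run_epochs → Spec_get_epoch_list num_sleep_epochs num_run_epochs (get_epoch_list num_sleep_epochs num_run_epochs)

-- ===== LEMMAS AND PROOFS =====

-- the alternating tag sequence both programs realise: F at even positions, G at odd ones
def pvMix {α : Type} (F G : Nat → α) (i : Nat) : α := if i % 2 = 0 then F (i / 2) else G (i / 2)

-- the tag lists as maps over a Nat range
def pvTag (c : Char) (k : Nat) : List Char := c :: PySem.Int.toChars ((k : Int) + 1)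

lemma pv_tags (c : Char) (m : Int) :
    (PySem.List.pyRange 0 m 1).map (fun i => c :: PySem.Int.toChars (i + 1))
      = (List.range m.toNat).map (pvTag c) := by
  rw [PySem.List.pyRange_one]
  simp [List.map_map, pvTag, Function.comp_def]

-- zip of a (t+1)-map with a t-map pairs index j with index j
lemma pv_zip_map_range {α β : Type} (F : Nat → α) (G : Nat → β) (t : Nat) :
    ((List.range (t+1)).map F).zip ((List.range t).map G)
      = (List.range t).map (fun j => (F j, G j)) := by
  apply List.ext_getElem
  · simp
  · intro k h1 h2
    simp at h1 h2
    simp [List.getElem_zip]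

-- flattening the zipped pairs gives the alternating sequence
lemma pv_flat_pairs {α : Type} (F G : Nat → α) (t : Nat) :
    (List.range t).flatMap (fun j => [F j, G j]) = (List.range (2*t)).map (pvMix F G) := by
  induction t with
  | zero => simp
  | succ t ih =>
    have h2 : 2 * (t+1) = (2*t + 1) + 1 := by omega
    rw [List.range_succ, List.flatMap_append, ih, h2, List.range_succ, List.range_succ]
    simp only [List.map_append, List.flatMap_cons, List.flatMap_nil, List.append_nil,
      List.map_cons, List.map_nil, List.append_assoc]
    congr 1
    have e1 : (2*t) % 2 = 0 := by omega
    have e2 : (2*t+1) % 2 = 1 := by omega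
    have e3 : (2*t) / 2 = t := by omega
    have e4 : (2*t+1) / 2 = t := by omega
    simp [pvMix, e1, e2, e3, e4]

-- B's interleave of the two mapped tag lists is the alternating sequence, length 2t+1
lemma pv_interleave_maps {α : Type} (F G : Nat → α) (t : Nat) :
    pvInterleave ((List.range (t+1)).map F) ((List.range t).map G)
      = (List.range (2*t+1)).map (pvMix F G) := by
  unfold pvInterleave
  rw [PySem.List.foldl_append_eq_flatMap, List.nil_append, pv_zip_map_range, List.flatMap_map,
    pv_flat_pairs]
  rw [List.length_map, List.length_range, PySem.List.slice_from_natCast, ← List.map_drop]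
  rw [List.range_succ, List.drop_left' (by simp)]
  rw [List.range_succ, List.map_append]
  congr 1
  have e1 : (2*t) % 2 = 0 := by omega
  have e3 : (2*t) / 2 = t := by omega
  simp [pvMix, e1, e3]

-- numbering by enumerate = numbering by the range index
lemma pv_enum_map {α β : Type} (n : Nat) (u : Nat → α) (f : Int → α → β) :
    (PySem.List.enumerate ((List.range n).map u) 0).map (fun p => f p.1 p.2)
      = (List.range n).map (fun (k : Nat) => f (k : Int) (u k)) := by
  apply List.ext_getElem
  · simp [PySem.List.length_enumerate]
  · intro k h1 h2
    simp only [List.getElem_map, PySem.List.getElem_enumerate, List.getElem_range]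
    simp

-- A's loop, rewritten over Nat indices: it realises the same alternating sequence
lemma pv_foldlA (F G : Nat → List Char) (t : Nat) :
    (PySem.List.pyRange 0 (2*(t:Int)+1) 1).foldl (fun acc i =>
        acc ++ [pvName (i + 1)
          (if PySem.Int.mod i 2 = 0
            then PySem.List.pyGetD ((List.range (t+1)).map F) (PySem.Int.floordiv i 2) []
            else PySem.List.pyGetD ((List.range t).map G) (PySem.Int.floordiv i 2) [])]) []
      = (List.range (2*t+1)).map (fun (k : Nat) => pvName ((k : Int) + 1) (pvMix F G k)) := by
  rw [PySem.List.foldl_append_singleton_eq_map, List.nil_append, PySem.List.pyRange_one]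
  have hn : ((2*(t:Int)+1) - 0).toNat = 2*t+1 := by omega
  rw [hn, List.map_map]
  apply List.map_congr_left
  intro k hk
  rw [List.mem_range] at hk
  simp only [Function.comp, zero_add]
  have h2 : (2:Int) = ((2:Nat):Int) := by norm_num
  rw [h2, PySem.Int.mod_natCast, PySem.Int.floordiv_natCast]
  have hhalf : k / 2 < t + 1 := by omega
  unfold pvMix
  by_cases he : k % 2 = 0
  · have hi : ((k % 2 : Nat) : Int) = 0 := by omega
    rw [if_pos hi, if_pos he, PySem.List.pyGetD_natCast, PySem.List.getD_map_range F (t+1) (k/2) [] hhalf]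
  · have h1 : ¬ (((k % 2 : Nat) : Int) = 0) := by omega
    have hlt : k / 2 < t := by omega
    rw [if_neg h1, if_neg he, PySem.List.pyGetD_natCast, PySem.List.getD_map_range G t (k/2) [] hlt]

-- parity filters of an odd-length range
lemma pv_range_filter_even (t : Nat) :
    (List.range (2*t+1)).filter (fun k => k % 2 == 0) = (List.range (t+1)).map (fun j => 2*j) := by
  induction t with
  | zero => decide
  | succ t ih =>
    have h2 : 2 * (t+1) + 1 = ((2*t+1) + 1) + 1 := by omega
    rw [h2, List.range_succ, List.range_succ, List.filter_append, List.filter_append, ih]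
    have e1 : (2*t+1) % 2 = 1 := by omega
    have e3 : 2*t+1+1 = 2*(t+1) := by omega
    rw [List.range_succ, List.map_append]
    simp [e1, e3]
    simp [List.range_succ]

lemma pv_range_filter_odd (t : Nat) :
    (List.range (2*t+1)).filter (fun k => !(k % 2 == 0)) = (List.range t).map (fun j => 2*j+1) := by
  induction t with
  | zero => decide
  | succ t ih =>
    have h2 : 2 * (t+1) + 1 = ((2*t+1) + 1) + 1 := by omega
    rw [h2, List.range_succ, List.range_succ, List.filter_append, List.filter_append, ih]
    have e1 : (2*t+1) % 2 = 1 := by omega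
    have e2 : (2*t+1+1) % 2 = 0 := by omega
    rw [List.range_succ, List.map_append]
    simp [e1, e2]

-- xs[::2] of a mapped range
lemma pv_slice2_map {β : Type} (f : Nat → β) (n : Nat) :
    PySem.List.slice? ((List.range n).map f) none none 2
      = some ((List.range ((n+1)/2)).map (fun j => f (2*j))) := by
  unfold PySem.List.slice? PySem.List.sliceIndices
  norm_num
  have hc : (if 0 < n then (((n:Int) + 2 - 1) / 2).toNat else 0) = (n+1)/2 := by
    split <;> omega
  rw [hc, List.filterMap_congr (g := some ∘ (fun j => f (2*j))) ?h, List.filterMap_eq_map]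
  case h =>
    intro x hx
    rw [List.mem_range] at hx
    have ht : ((2 : Int) * (x:Nat)).toNat = 2*x := by omega
    have hxn : 2*x < n := by omega
    simp [ht, hxn]

-- xs[1::2] of a mapped range
lemma pv_slice2_one_map {β : Type} (f : Nat → β) (n : Nat) :
    PySem.List.slice? ((List.range n).map f) (some 1) none 2
      = some ((List.range (n/2)).map (fun j => f (2*j+1))) := by
  unfold PySem.List.slice? PySem.List.sliceIndices
  norm_num
  have hc : (if 1 < n then (((n:Int) - min 1 (n:Int) + 2 - 1) / 2).toNat else 0) = n/2 := by
    split <;> omega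
  rw [hc, List.filterMap_congr (g := some ∘ (fun j => f (2*j+1))) ?h, List.filterMap_eq_map]
  case h =>
    intro x hx
    rw [List.mem_range] at hx
    have ht : (min 1 (n:Int) + 2 * (x:Nat)).toNat = 2*x+1 := by omega
    have hxn : 2*x+1 < n := by omega
    simp [ht, hxn]

-- a sleep tag never starts with 'r'; a run tag always does
lemma pv_startswith_s (cs : List Char) : PySem.Chars.startswith ('s' :: cs) ['r'] = false := by
  simp [PySem.Chars.startswith, List.isPrefixOf]

lemma pv_startswith_r (cs : List Char) : PySem.Chars.startswith ('r' :: cs) ['r'] = true := by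
  simp [PySem.Chars.startswith, List.isPrefixOf]

-- enumerate-numbering specialised to the name formatter (rw-friendly form)
lemma pv_enum_name (n : Nat) (u : Nat → List Char) :
    (PySem.List.enumerate ((List.range n).map u) 0).map (fun p => pvName (p.1 + 1) p.2)
      = (List.range n).map (fun (k : Nat) => pvName ((k : Int) + 1) (u k)) :=
  pv_enum_map n u (fun i a => pvName (i + 1) a)

-- the tag-prefix filter picks exactly the odd (resp. even) positions
lemma pv_filter_sr (t : Nat) :
    (List.range (2*t+1)).filter (fun k => PySem.Chars.startswith (pvMix (pvTag 's') (pvTag 'r') k) ['r'])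
      = (List.range t).map (fun j => 2*j+1) := by
  rw [← pv_range_filter_odd t]
  apply List.filter_congr
  intro k _
  unfold pvMix pvTag
  by_cases he : k % 2 = 0 <;> simp [he, pv_startswith_s, pv_startswith_r]

lemma pv_filter_rs (t : Nat) :
    (List.range (2*t+1)).filter (fun k => PySem.Chars.startswith (pvMix (pvTag 'r') (pvTag 's') k) ['r'])
      = (List.range (t+1)).map (fun j => 2*j) := by
  rw [← pv_range_filter_even t]
  apply List.filter_congr
  intro k _
  unfold pvMix pvTag
  by_cases he : k % 2 = 0 <;> simp [he, pv_startswith_s, pv_startswith_r]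

-- ===== VERDICT (by name: the statement is the Claim_ definition above) =====
theorem get_epoch_list_spec : Claim_equal_get_epoch_list := by
  intro s r _ hpre
  unfold Spec_get_epoch_list get_epoch_list get_epoch_list_alt
  rcases hpre with h | h
  · -- sleep leads: s = r + 1
    have hgt : r < s := by omega
    simp only [gt_iff_lt, if_pos hgt]
    rcases (by omega : 0 ≤ r ∨ r < 0) with hr | hr
    · obtain ⟨t, ht⟩ : ∃ t : Nat, r = (t : Int) := ⟨r.toNat, by omega⟩
      subst ht
      have hs : s = (t : Int) + 1 := by omega
      subst hs
      rw [pv_tags 's', pv_tags 'r']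
      have e1 : ((t:Int) + 1).toNat = t + 1 := by omega
      have e2 : ((t:Int)).toNat = t := by omega
      have e3 : (t:Int) + 1 + (t:Int) = 2*(t:Int) + 1 := by ring
      rw [e1, e2, e3, pv_foldlA (pvTag 's') (pvTag 'r') t, pv_slice2_one_map,
        pv_interleave_maps (pvTag 's') (pvTag 'r') t, pv_enum_name,
        List.zip_map', List.filter_map, List.map_map]
      have hp : ((fun (p : String × List Char) => PySem.Chars.startswith p.2 ['r']) ∘
            (fun (k : Nat) => (pvName ((k : Int) + 1) (pvMix (pvTag 's') (pvTag 'r') k),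
              pvMix (pvTag 's') (pvTag 'r') k)))
          = fun k => PySem.Chars.startswith (pvMix (pvTag 's') (pvTag 'r') k) ['r'] := rfl
      rw [hp, pv_filter_sr, List.map_map]
      have hhalf : (2*t+1)/2 = t := by omega
      rw [hhalf]
      simp [Function.comp_def]
    · -- degenerate: r < 0, all lists empty
      have h1 : PySem.List.pyRange 0 s 1 = [] := PySem.List.pyRange_one_eq_nil (by omega)
      have h2 : PySem.List.pyRange 0 r 1 = [] := PySem.List.pyRange_one_eq_nil (by omega)
      have h3 : PySem.List.pyRange 0 (s + r) 1 = [] := PySem.List.pyRange_one_eq_nil (by omega)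
      rw [h1, h2, h3]
      rfl
  · -- run leads: r = s + 1
    have hgt : ¬ r < s := by omega
    simp only [gt_iff_lt, if_neg hgt]
    rcases (by omega : 0 ≤ s ∨ s < 0) with hs | hs
    · obtain ⟨t, ht⟩ : ∃ t : Nat, s = (t : Int) := ⟨s.toNat, by omega⟩
      subst ht
      have hr : r = (t : Int) + 1 := by omega
      subst hr
      rw [pv_tags 's', pv_tags 'r']
      have e1 : ((t:Int) + 1).toNat = t + 1 := by omega
      have e2 : ((t:Int)).toNat = t := by omega
      have e3 : (t:Int) + ((t:Int) + 1) = 2*(t:Int) + 1 := by ring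
      rw [e1, e2, e3, pv_foldlA (pvTag 'r') (pvTag 's') t, pv_slice2_map,
        pv_interleave_maps (pvTag 'r') (pvTag 's') t, pv_enum_name,
        List.zip_map', List.filter_map, List.map_map]
      have hp : ((fun (p : String × List Char) => PySem.Chars.startswith p.2 ['r']) ∘
            (fun (k : Nat) => (pvName ((k : Int) + 1) (pvMix (pvTag 'r') (pvTag 's') k),
              pvMix (pvTag 'r') (pvTag 's') k)))
          = fun k => PySem.Chars.startswith (pvMix (pvTag 'r') (pvTag 's') k) ['r'] := rfl
      rw [hp, pv_filter_rs, List.map_map]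
      have hhalf : (2*t+1+1)/2 = t+1 := by omega
      rw [hhalf]
      simp [Function.comp_def]
    · have h1 : PySem.List.pyRange 0 s 1 = [] := PySem.List.pyRange_one_eq_nil (by omega)
      have h2 : PySem.List.pyRange 0 r 1 = [] := PySem.List.pyRange_one_eq_nil (by omega)
      have h3 : PySem.List.pyRange 0 (s + r) 1 = [] := PySem.List.pyRange_one_eq_nil (by omega)
      rw [h1, h2, h3]
      rfl
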